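-- pv_equiv track=rewrite | github.com/fedora-infra/mirrormanager2 | mirrorlist/mirrorlist_server.py | trim_to_preferred_protocols
-- ===== SOURCE A (Python) =====
-- def trim_to_preferred_protocols(hosts_and_urls, try_protocols=None):
--     """ Remove all protocols but https, http and ftp,
--     and if both http and ftp are offered, leave only http.
--     If try_protocols is not empty only the specified
--     protocols will be used.
--     Return [(hostid, url), ...] """
--     results = []
--     if not try_protocols:
--         try_protocols = ('https', 'http', 'ftp')
--     for (hostid, hcurls) in hosts_and_urls:
--         protocols = {}
--         url = None
--         for hcurl in hcurls:
--             for p in try_protocols: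
--                 if hcurl.startswith(p+':'):
--                     protocols[p] = hcurl
--
--         for p in try_protocols:
--             if p in protocols:
--                 url = [protocols[p]]
--                 break
--
--         if url is not None:
--             results.append((hostid, url))
--     return results
-- ===== SOURCE B (Python) =====
-- def trim_to_preferred_protocols(hosts_and_urls, try_protocols=None):
--     """Same result as the original, without the per-host protocol dict:
--     scan protocols in preference order, take the last matching url."""
--     protos = list(try_protocols) if try_protocols else ['https', 'http', 'ftp']
--     results = []
--     for hostid, hcurls in hosts_and_urls:
--         for p in protos:
--             matches = [u for u in hcurls if u.startswith(p + ':')]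
--             if matches:
--                 results.append((hostid, [matches[-1]]))
--                 break
--     return results
-- ===== Notes on version B (the rewrite author's own statement) =====
-- stated objective: simpler
-- what changed: Replaced the per-host protocol dict (built by a urls-by-protocols double loop, then a separate preference scan over the dict) with a direct scan over protocols in preference order that filters the host's urls and takes the last match, breaking at the first protocol with any match.
import Mathlib
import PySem

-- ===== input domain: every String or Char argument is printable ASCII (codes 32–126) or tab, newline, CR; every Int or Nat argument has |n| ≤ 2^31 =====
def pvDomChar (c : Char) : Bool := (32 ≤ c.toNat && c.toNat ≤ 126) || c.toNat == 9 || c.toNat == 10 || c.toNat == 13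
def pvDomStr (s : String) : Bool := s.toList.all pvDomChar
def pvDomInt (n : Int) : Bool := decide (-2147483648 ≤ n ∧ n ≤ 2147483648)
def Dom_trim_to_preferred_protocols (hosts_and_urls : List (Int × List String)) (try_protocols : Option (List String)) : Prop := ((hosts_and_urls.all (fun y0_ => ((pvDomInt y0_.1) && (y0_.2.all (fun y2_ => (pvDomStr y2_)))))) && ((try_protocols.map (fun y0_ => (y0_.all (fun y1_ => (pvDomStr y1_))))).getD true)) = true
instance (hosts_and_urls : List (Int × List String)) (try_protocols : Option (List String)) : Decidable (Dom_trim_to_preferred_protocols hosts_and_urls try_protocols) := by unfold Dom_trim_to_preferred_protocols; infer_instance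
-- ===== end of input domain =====

-- B replaces A's per-host protocol dict with a direct preference-order scan taking the last matching url (objective: simpler).


-- ===== PORT A =====
def trim_to_preferred_protocols (hosts_and_urls : List (Int × List String)) (try_protocols : Option (List String)) : List (Int × List String) :=
  -- 'if not try_protocols': None or the empty list fall back to the default tuple
  let tps : List String :=
    match try_protocols with
    | none => ["https", "http", "ftp"]
    | some l => if l = [] then ["https", "http", "ftp"] else l
  hosts_and_urls.foldl (fun results h =>
    let protocols : PySem.Dict String String :=
      h.2.foldl (fun d hcurl =>
        tps.foldl (fun d p =>
          if PySem.Str.startswith hcurl (p ++ ":") then d.insert p hcurl else d) d)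
        PySem.Dict.empty
    let url : Option (List String) :=
      tps.foldl (fun u p =>
        match u with
        | some _ => u          -- 'break': once set, later iterations leave it unchanged
        | none =>
          match protocols.get? p with
          | some v => some [v]
          | none => none) none
    match url with
    | some u => results ++ [(h.1, u)]
    | none => results) []

-- ===== PORT B =====
def pvLastMatch (hcurls : List String) (p : String) : Option String :=
  (hcurls.filter (fun u => PySem.Str.startswith u (p ++ ":"))).getLast?

def pvFirstProtoUrl (hcurls : List String) : List String → Option (List String)
  | [] => none
  | p :: ps =>
    match pvLastMatch hcurls p with
    | some m => some [m]
    | none => pvFirstProtoUrl hcurls ps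

def trim_to_preferred_protocols_alt (hosts_and_urls : List (Int × List String)) (try_protocols : Option (List String)) : List (Int × List String) :=
  let protos : List String :=
    match try_protocols with
    | none => ["https", "http", "ftp"]
    | some l => if l = [] then ["https", "http", "ftp"] else l
  hosts_and_urls.foldl (fun results h =>
    match pvFirstProtoUrl h.2 protos with
    | some url => results ++ [(h.1, url)]
    | none => results) []

-- ===== PRECONDITION & SPEC =====
def Spec_trim_to_preferred_protocols (hosts_and_urls : List (Int × List String)) (try_protocols : Option (List String)) (out : List (Int × List String)) : Prop := out = trim_to_preferred_protocols_alt hosts_and_urls try_protocols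
instance (hosts_and_urls : List (Int × List String)) (try_protocols : Option (List String)) (out : List (Int × List String)) : Decidable (Spec_trim_to_preferred_protocols hosts_and_urls try_protocols out) := by unfold Spec_trim_to_preferred_protocols; infer_instance

-- ===== CLAIM (what is proved, stated in full; the proofs are below) =====
def Claim_equal_trim_to_preferred_protocols : Prop := ∀ (hosts_and_urls : List (Int × List String)) (try_protocols : Option (List String)), Dom_trim_to_preferred_protocols hosts_and_urls try_protocols → Spec_trim_to_preferred_protocols hosts_and_urls try_protocols (trim_to_preferred_protocols hosts_and_urls try_protocols)

-- ===== LEMMAS AND PROOFS =====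

-- One url pass of A's dict loop (predicate generalized): lookup after the inner protocol loop.
theorem pv_innerfold_get? (m : String → Bool) (v : String) (tps : List String)
    (d : PySem.Dict String String) (q : String) :
    (tps.foldl (fun d p => if m p then d.insert p v else d) d).get? q
    = if q ∈ tps ∧ m q then some v else d.get? q := by
  induction tps generalizing d with
  | nil => simp
  | cons p ps ih =>
    rw [List.foldl_cons, ih]
    by_cases hqp : q = p
    · subst hqp
      by_cases hm : m q
      · simp [hm, PySem.Dict.get?_insert_self]
      · simp [hm]
    · by_cases hm : m p
      · simp [hm, PySem.Dict.get?_insert_of_ne _ _ hqp, List.mem_cons, hqp]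
      · simp [hm, List.mem_cons, hqp]

-- A's whole dict-building loop: the lookup at q ∈ tps is the LAST url matching q, else the start dict's value.
theorem pv_hostfold_get? (M : String → String → Bool) (tps : List String) (hcurls : List String)
    (d : PySem.Dict String String) (q : String) (hq : q ∈ tps) :
    (hcurls.foldl (fun d hcurl =>
        tps.foldl (fun d p => if M hcurl p then d.insert p hcurl else d) d) d).get? q
    = ((hcurls.filter (fun u => M u q)).getLast?).or (d.get? q) := by
  induction hcurls generalizing d with
  | nil => simp
  | cons u us ih =>
    rw [List.foldl_cons, ih, pv_innerfold_get? (M u) u tps d q, List.filter_cons]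
    by_cases hm : M u q
    · simp only [hm, hq, and_self, if_true, List.getLast?_cons]
      cases (us.filter (fun u => M u q)).getLast? <;> simp
    · simp [hm]

-- A's break loop: once set, stays.
theorem pv_breakloop_stays (ps : List String) (f : Option (List String) → String → Option (List String))
    (hf : ∀ x p, f (some x) p = some x) (x : List String) :
    ps.foldl f (some x) = some x := by
  induction ps with
  | nil => rfl
  | cons p ps ih => simp [hf, ih]

-- A's break loop over a tail of tps equals a preference-order foldr over the last matches.
theorem pv_breakloop_eq (M : String → String → Bool) (tps hcurls : List String)
    (ps : List String) (hps : ∀ p ∈ ps, p ∈ tps) :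
    ps.foldl (fun u p =>
      match u with
      | some _ => u
      | none =>
        match (hcurls.foldl (fun d hcurl =>
            tps.foldl (fun d p => if M hcurl p then d.insert p hcurl else d) d)
            PySem.Dict.empty).get? p with
        | some v => some [v]
        | none => none) none
    = ps.foldr (fun p acc =>
        match (hcurls.filter (fun u => M u p)).getLast? with
        | some m => some [m]
        | none => acc) none := by
  induction ps with
  | nil => rfl
  | cons p ps ih =>
    have hp : p ∈ tps := hps p (List.mem_cons_self ..)
    have hget := pv_hostfold_get? M tps hcurls PySem.Dict.empty p hp
    rw [PySem.Dict.get?_empty, Option.or_none] at hget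
    cases h : (hcurls.filter (fun u => M u p)).getLast? with
    | none =>
      simp only [List.foldl_cons, List.foldr_cons, hget, h]
      exact ih (fun p hp => hps p (List.mem_cons_of_mem _ hp))
    | some m =>
      simp only [List.foldl_cons, List.foldr_cons, hget, h]
      exact pv_breakloop_stays _ _ (fun x p => rfl) [m]

-- B's recursion as a foldr, to meet pv_breakloop_eq.
theorem pv_firstProtoUrl_foldr (hcurls : List String) (ps : List String) :
    pvFirstProtoUrl hcurls ps
    = ps.foldr (fun p acc =>
        match (hcurls.filter (fun u => PySem.Str.startswith u (p ++ ":"))).getLast? with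
        | some m => some [m]
        | none => acc) none := by
  induction ps with
  | nil => rfl
  | cons p ps ih => rw [List.foldr_cons, ← ih]; rfl

-- The two per-host bodies agree, so the two result folds agree.
theorem pv_main (tps : List String) (hs : List (Int × List String)) :
    hs.foldl (fun results h =>
      match (tps.foldl (fun u p =>
          match u with
          | some _ => u
          | none =>
            match (h.2.foldl (fun d hcurl =>
                tps.foldl (fun d p =>
                  if PySem.Str.startswith hcurl (p ++ ":") then d.insert p hcurl else d) d)
                PySem.Dict.empty).get? p with
            | some v => some [v]
            | none => none) none) with
      | some u => results ++ [(h.1, u)]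
      | none => results) []
    = hs.foldl (fun results h =>
      match pvFirstProtoUrl h.2 tps with
      | some url => results ++ [(h.1, url)]
      | none => results) [] := by
  congr 1
  funext results h
  rw [pv_breakloop_eq (fun u p => PySem.Str.startswith u (p ++ ":")) tps h.2 tps (fun _ hp => hp),
      ← pv_firstProtoUrl_foldr]

-- ===== VERDICT (by name: the statement is the Claim_ definition above) =====
theorem trim_to_preferred_protocols_spec : Claim_equal_trim_to_preferred_protocols := by
  intro hs tp _
  show trim_to_preferred_protocols hs tp = trim_to_preferred_protocols_alt hs tp
  unfold trim_to_preferred_protocols trim_to_preferred_protocols_alt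
  exact pv_main _ hs
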